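-- pv_equiv track=rewrite | github.com/VvEK-Hiremath/Python-Problems | origin_bool.py | is_Origin
-- ===== SOURCE A (Python) =====
-- def is_Origin(s):
--     track = [0,0]
--     for i in range(0,len(s)):
--         if(s[i] == 'U'):
--             track[1] += 1
--         elif(s[i] == 'D'):
--             track[1] -= 1
--         elif(s[i] == 'L'):
--             track[0] -= 1
--         else:
--             track[0] +=1
--     if(track.count(0) == 2):
--         return True
--     else:
--         return False
-- ===== SOURCE B (Python) =====
-- OPP = {'U': 'D', 'D': 'U', 'L': 'R', 'R': 'L'}
--
-- def is_Origin(s):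
--     # Cancellation-stack algorithm: keep one stack per axis; a move that is
--     # the opposite of the stack top cancels it (pop), otherwise it is pushed.
--     # Each stack only ever holds copies of a single symbol, so it ends empty
--     # exactly when the two opposite moves on that axis occurred equally often,
--     # i.e. when the net displacement on that axis is zero.
--     vert, horiz = [], []
--     for c in s:
--         m = c if c in ('U', 'D', 'L') else 'R'  # any non-U/D/L char is a +x move
--         stack = vert if m in ('U', 'D') else horiz
--         if stack and stack[-1] == OPP[m]:
--             stack.pop()
--         else:
--             stack.append(m)
--     return not vert and not horiz
-- ===== Notes on version B (the rewrite author's own statement) =====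
-- stated objective: alternative
-- what changed: Replaces A's running [x,y] coordinate counter by a cancellation-stack algorithm: one stack per axis where each move pops its opposite off the stack top or is pushed, and the walk returns to origin iff both stacks end empty.
import Mathlib
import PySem

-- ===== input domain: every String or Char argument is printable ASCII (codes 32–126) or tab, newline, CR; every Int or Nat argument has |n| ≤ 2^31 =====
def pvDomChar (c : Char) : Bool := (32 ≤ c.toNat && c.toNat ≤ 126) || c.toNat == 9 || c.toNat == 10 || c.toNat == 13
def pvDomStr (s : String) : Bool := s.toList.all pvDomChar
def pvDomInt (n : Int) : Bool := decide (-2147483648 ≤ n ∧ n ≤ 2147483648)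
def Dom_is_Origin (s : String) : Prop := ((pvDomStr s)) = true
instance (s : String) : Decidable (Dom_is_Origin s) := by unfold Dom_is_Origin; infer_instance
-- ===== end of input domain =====

-- B replaces A's running [x,y] coordinate counter by a cancellation-stack
-- algorithm (one stack per axis: a move pops its opposite off the stack top or
-- is pushed; origin iff both stacks end empty); same O(n) cost, alternative structure.

-- ===== PORT A =====
-- 'for i in range(0,len(s))' reads s[i] for every index in order, i.e. iterates the characters of s.
def is_Origin (s : String) : Bool :=
  let track : Int × Int :=
    s.toList.foldl (fun t c =>
      if c == 'U' then (t.1, t.2 + 1)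
      else if c == 'D' then (t.1, t.2 - 1)
      else if c == 'L' then (t.1 - 1, t.2)
      else (t.1 + 1, t.2)) (0, 0)
  if PySem.List.count [track.1, track.2] (0 : Int) == 2 then true else false

-- ===== PORT B =====
-- the module-level OPP dict of Source B
def pvOPP : PySem.Dict Char Char := PySem.Dict.ofList [('U', 'D'), ('D', 'U'), ('L', 'R'), ('R', 'L')]

-- one loop step of Source B: st = (vert, horiz); stacks are Lean lists with the top
-- at the head (Python appends/pops/reads stack[-1] at the end — the same stack
-- discipline).  OPP[m] is a plain lookup; m is always a key of OPP, so the
-- dict's get? with a dummy default is exact here.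
def pvStepB (st : List Char × List Char) (c : Char) : List Char × List Char :=
  let m := if c == 'U' || c == 'D' || c == 'L' then c else 'R'
  if m == 'U' || m == 'D' then
    match st.1 with
    | t :: rest => if t == (PySem.Dict.get? pvOPP m).getD ' ' then (rest, st.2) else (m :: st.1, st.2)
    | [] => (m :: st.1, st.2)
  else
    match st.2 with
    | t :: rest => if t == (PySem.Dict.get? pvOPP m).getD ' ' then (st.1, rest) else (st.1, m :: st.2)
    | [] => (st.1, m :: st.2)

def is_Origin_alt (s : String) : Bool :=
  let st := s.toList.foldl pvStepB ([], [])
  st.1.isEmpty && st.2.isEmpty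

-- ===== PRECONDITION & SPEC =====
def Spec_is_Origin (s : String) (out : Bool) : Prop := out = is_Origin_alt s
instance (s : String) (out : Bool) : Decidable (Spec_is_Origin s out) := by unfold Spec_is_Origin; infer_instance

-- ===== CLAIM (what is proved, stated in full; the proofs are below) =====
def Claim_equal_is_Origin : Prop := ∀ (s : String), Dom_is_Origin s → Spec_is_Origin s (is_Origin s)

-- ===== LEMMAS AND PROOFS =====

-- Canonical shape of B's stacks: a stack holds a run of its positive symbol
-- (net v > 0) or of its negative symbol (net v < 0).
def pvRep (p q : Char) (v : Int) : List Char :=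
  if 0 ≤ v then List.replicate v.toNat p else List.replicate (-v).toNat q

def pvRepV (v : Int) : List Char := pvRep 'U' 'D' v
def pvRepH (h : Int) : List Char := pvRep 'R' 'L' h

theorem pvRep_empty (p q : Char) (v : Int) : pvRep p q v = [] ↔ v = 0 := by
  unfold pvRep; split_ifs <;> simp <;> omega

theorem pvRep_ofNat (p q : Char) (n : Nat) :
    pvRep p q (Int.ofNat n) = List.replicate n p := by
  simp [pvRep]

theorem pvRep_negSucc (p q : Char) (n : Nat) :
    pvRep p q (Int.negSucc n) = List.replicate (n + 1) q := by
  rw [pvRep, if_neg (by omega)]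
  congr 1

theorem pvRep_ofNat_add_one (p q : Char) (n : Nat) :
    pvRep p q (Int.ofNat n + 1) = List.replicate (n + 1) p := by
  rw [show Int.ofNat n + 1 = Int.ofNat (n + 1) by simp, pvRep_ofNat]

theorem pvRep_negSucc_add_one (p q : Char) (n : Nat) :
    pvRep p q (Int.negSucc n + 1) = List.replicate n q := by
  cases n with
  | zero => rw [show Int.negSucc 0 + 1 = Int.ofNat 0 by decide, pvRep_ofNat]; rfl
  | succ m => rw [show Int.negSucc (m + 1) + 1 = Int.negSucc m by omega, pvRep_negSucc]

-- A "positive" move (push p, pop q) on a canonical stack increments the net.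
theorem pvStep_inc (p q : Char) (hpq : p ≠ q) (v : Int) (X : List Char) :
    (match pvRep p q v with
     | t :: rest => if t == q then (rest, X) else (p :: pvRep p q v, X)
     | [] => (p :: pvRep p q v, X)) = (pvRep p q (v + 1), X) := by
  cases v with
  | ofNat n =>
    rw [pvRep_ofNat, pvRep_ofNat_add_one]
    cases n with
    | zero => simp
    | succ k => simp [List.replicate_succ, hpq]
  | negSucc n =>
    rw [pvRep_negSucc, pvRep_negSucc_add_one, List.replicate_succ]
    simp

-- A "negative" move (push q, pop p) decrements the net.
theorem pvStep_dec (p q : Char) (hpq : p ≠ q) (v : Int) (X : List Char) :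
    (match pvRep p q v with
     | t :: rest => if t == p then (rest, X) else (q :: pvRep p q v, X)
     | [] => (q :: pvRep p q v, X)) = (pvRep p q (v - 1), X) := by
  have key : ∀ w : Int, pvRep p q (-w) = pvRep q p w := by
    intro w; unfold pvRep; split_ifs <;> (first | rfl | simp_all | omega) <;>
      (try omega)
  have h1 : pvRep p q v = pvRep q p (-v) := by rw [← key]; simp
  have h2 : pvRep p q (v - 1) = pvRep q p (-v + 1) := by
    rw [← key]; congr 1; ring
  rw [h1, h2, ← pvStep_inc q p (Ne.symm hpq) (-v) X]

-- The same two lemmas with the pair the other way round (horizontal stack).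
theorem pvStep_inc' (p q : Char) (hpq : p ≠ q) (v : Int) (X : List Char) :
    (match pvRep p q v with
     | t :: rest => if t == q then (X, rest) else (X, p :: pvRep p q v)
     | [] => (X, p :: pvRep p q v)) = (X, pvRep p q (v + 1)) := by
  cases v with
  | ofNat n =>
    rw [pvRep_ofNat, pvRep_ofNat_add_one]
    cases n with
    | zero => simp
    | succ k => simp [List.replicate_succ, hpq]
  | negSucc n =>
    rw [pvRep_negSucc, pvRep_negSucc_add_one, List.replicate_succ]
    simp

theorem pvStep_dec' (p q : Char) (hpq : p ≠ q) (v : Int) (X : List Char) :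
    (match pvRep p q v with
     | t :: rest => if t == p then (X, rest) else (X, q :: pvRep p q v)
     | [] => (X, q :: pvRep p q v)) = (X, pvRep p q (v - 1)) := by
  have key : ∀ w : Int, pvRep p q (-w) = pvRep q p w := by
    intro w; unfold pvRep; split_ifs <;> (first | rfl | simp_all | omega) <;> (try omega)
  have h1 : pvRep p q v = pvRep q p (-v) := by rw [← key]; simp
  have h2 : pvRep p q (v - 1) = pvRep q p (-v + 1) := by
    rw [← key]; congr 1; ring
  rw [h1, h2, ← pvStep_inc' q p (Ne.symm hpq) (-v) X]

-- literal lookups in the OPP dict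
theorem pvOPP_U : (PySem.Dict.get? pvOPP 'U').getD ' ' = 'D' := by decide
theorem pvOPP_D : (PySem.Dict.get? pvOPP 'D').getD ' ' = 'U' := by decide
theorem pvOPP_L : (PySem.Dict.get? pvOPP 'L').getD ' ' = 'R' := by decide
theorem pvOPP_R : (PySem.Dict.get? pvOPP 'R').getD ' ' = 'L' := by decide

-- One step of B on canonical stacks updates the corresponding net by ±1.
theorem pvStepB_rep (v h : Int) (c : Char) :
    pvStepB (pvRepV v, pvRepH h) c =
      (if c = 'U' then (pvRepV (v + 1), pvRepH h)
       else if c = 'D' then (pvRepV (v - 1), pvRepH h)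
       else if c = 'L' then (pvRepV v, pvRepH (h - 1))
       else (pvRepV v, pvRepH (h + 1))) := by
  by_cases hU : c = 'U'
  · subst hU
    simp only [pvStepB, if_pos rfl, pvRepV, pvRepH]
    rw [show (if ('U' == 'U' || 'U' == 'D' || 'U' == 'L') then 'U' else 'R') = 'U' from rfl]
    simp only [pvOPP_U, show ('U' == 'U' || 'U' == 'D') = true from rfl, if_pos rfl]
    exact pvStep_inc 'U' 'D' (by decide) v _
  · by_cases hD : c = 'D'
    · subst hD
      simp only [pvStepB, if_neg hU, if_pos rfl, pvRepV, pvRepH]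
      rw [show (if ('D' == 'U' || 'D' == 'D' || 'D' == 'L') then 'D' else 'R') = 'D' from rfl]
      simp only [pvOPP_D, show ('D' == 'U' || 'D' == 'D') = true from rfl, if_pos rfl]
      exact pvStep_dec 'U' 'D' (by decide) v _
    · by_cases hL : c = 'L'
      · subst hL
        simp only [pvStepB, if_neg hU, if_neg hD, if_pos rfl, pvRepV, pvRepH]
        rw [show (if ('L' == 'U' || 'L' == 'D' || 'L' == 'L') then 'L' else 'R') = 'L' from rfl]
        simp only [pvOPP_L]
        rw [if_neg (by decide : ¬ (('L' == 'U' || 'L' == 'D') = true))]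
        exact pvStep_dec' 'R' 'L' (by decide) h _
      · simp only [pvStepB, if_neg hU, if_neg hD, if_neg hL, pvRepV, pvRepH]
        have hm : (if c == 'U' || c == 'D' || c == 'L' then c else 'R') = 'R' := by
          simp [hU, hD, hL]
        rw [hm]
        simp only [pvOPP_R]
        rw [if_neg (by decide : ¬ (('R' == 'U' || 'R' == 'D') = true))]
        exact pvStep_inc' 'R' 'L' (by decide) h _

-- Invariant for B's whole loop: on canonical stacks it computes the two nets.
theorem pvFoldB_rep (l : List Char) (v h : Int) :
    l.foldl pvStepB (pvRepV v, pvRepH h) =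
      (pvRepV (v + l.count 'U' - l.count 'D'),
       pvRepH (h + (l.countP (fun c => !(c == 'U' || c == 'D' || c == 'L'))) - l.count 'L')) := by
  induction l generalizing v h with
  | nil => simp
  | cons c t ih =>
    rw [List.foldl_cons, pvStepB_rep, List.count_cons, List.count_cons, List.count_cons,
      List.countP_cons]
    by_cases hU : c = 'U'
    · subst hU; rw [if_pos rfl, ih]
      refine Prod.ext ?_ ?_ <;> simp <;> congr 1 <;> push_cast <;> ring
    · by_cases hD : c = 'D'
      · subst hD; rw [if_neg hU, if_pos rfl, ih]
        refine Prod.ext ?_ ?_ <;> simp [hU] <;> congr 1 <;> push_cast <;> ring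
      · by_cases hL : c = 'L'
        · subst hL; rw [if_neg hU, if_neg hD, if_pos rfl, ih]
          refine Prod.ext ?_ ?_ <;> simp [hU, hD] <;> congr 1 <;> push_cast <;> ring
        · rw [if_neg hU, if_neg hD, if_neg hL, ih]
          refine Prod.ext ?_ ?_ <;> simp [hU, hD, hL] <;> congr 1 <;> push_cast <;> ring

-- A's loop in closed form over the same counts.
theorem is_Origin_fold_eq (l : List Char) (a b : Int) :
    l.foldl (fun (t : Int × Int) c =>
      if c == 'U' then (t.1, t.2 + 1)
      else if c == 'D' then (t.1, t.2 - 1)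
      else if c == 'L' then (t.1 - 1, t.2)
      else (t.1 + 1, t.2)) (a, b)
    = (a + (l.countP (fun c => !(c == 'U' || c == 'D' || c == 'L')) : Int) - l.count 'L',
       b + (l.count 'U' : Int) - l.count 'D') := by
  induction l generalizing a b with
  | nil => simp
  | cons c t ih =>
    rw [List.foldl_cons]
    by_cases hU : c = 'U'
    · subst hU; rw [if_pos (by decide), ih]
      refine Prod.ext ?_ ?_ <;> simp <;> push_cast <;> ring
    · by_cases hD : c = 'D'
      · subst hD; rw [if_neg (by decide), if_pos (by decide), ih]
        refine Prod.ext ?_ ?_ <;> simp [hU] <;> push_cast <;> ring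
      · by_cases hL : c = 'L'
        · subst hL; rw [if_neg (by decide), if_neg (by decide), if_pos (by decide), ih]
          refine Prod.ext ?_ ?_ <;> simp [hU, hD] <;> push_cast <;> ring
        · rw [if_neg (by simp [hU]), if_neg (by simp [hD]), if_neg (by simp [hL]), ih]
          refine Prod.ext ?_ ?_ <;> simp [hU, hD, hL] <;> push_cast <;> ring

-- ===== VERDICT (by name: the statement is the Claim_ definition above) =====
theorem is_Origin_spec : Claim_equal_is_Origin := by
  intro s _
  unfold Spec_is_Origin is_Origin is_Origin_alt
  have hB : s.toList.foldl pvStepB ([], []) =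
      (pvRepV ((0:Int) + s.toList.count 'U' - s.toList.count 'D'),
       pvRepH ((0:Int) + (s.toList.countP (fun c => !(c == 'U' || c == 'D' || c == 'L'))) - s.toList.count 'L')) := by
    have := pvFoldB_rep s.toList 0 0
    simpa [pvRepV, pvRepH, pvRep] using this
  rw [hB, is_Origin_fold_eq]
  rw [Bool.eq_iff_iff]
  simp only [PySem.List.count, List.count_cons, List.count_nil, beq_iff_eq,
    Bool.if_true_left, Bool.and_eq_true, List.isEmpty_iff, pvRepV, pvRepH, pvRep_empty]
  split_ifs <;> simp_all <;> omega
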